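-- pv_equiv track=rewrite | github.com/munaAchyuta/practice | logic.py | get_invmatchseq
-- ===== SOURCE A (Python) =====
-- def get_invmatchseq(lst_of_lst_invnumbers):
--     output = []
--     flag = 0
--     for ind_i, i in enumerate(lst_of_lst_invnumbers):
--         if ind_i+1 >= len(lst_of_lst_invnumbers):
--             if len(lst_of_lst_invnumbers) == 1:
--                 return [(ind_i,ind_i)]
--             break
--
--         for ind_j, j in enumerate(lst_of_lst_invnumbers[ind_i+1:]):
--             if any([True for x in i if x in j]):
--                 output.append((ind_i,ind_i+1+ind_j))
--                 flag = 1
--     if flag == 0: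
--         flag = 0
--         return [(ind_i,ind_i)]
--
--     return output
-- ===== SOURCE B (Python) =====
-- def get_invmatchseq(lst_of_lst_invnumbers):
--     n = len(lst_of_lst_invnumbers)
--     # inverted index: element -> increasing list of indices of lists containing it
--     inv = {}
--     for idx, lst in enumerate(lst_of_lst_invnumbers):
--         for x in lst:
--             ids = inv.setdefault(x, [])
--             if not ids or ids[-1] != idx:
--                 ids.append(idx)
--     # partners[i] = set of j > i such that lists i and j share an element
--     partners = [set() for _ in range(n)]
--     for ids in inv.values():
--         for pos, i in enumerate(ids):
--             s = partners[i]
--             for j in ids[pos + 1:]: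
--                 s.add(j)
--     output = [(i, j) for i in range(n) for j in sorted(partners[i])]
--     if not output:
--         return [(n - 1, n - 1)]
--     return output
-- ===== Notes on version B (the rewrite author's own statement) =====
-- stated objective: faster
-- what changed: Replaces A's nested scan over all index pairs with quadratic list-membership tests by an inverted index element->sorted list of containing indices, from which partner sets per index are generated and emitted in order; the flag/slice/enumerate bookkeeping is gone.
-- outside the precondition, e.g. on get_invmatchseq([]): A raises UnboundLocalError, B returns [(-1, -1)]
import Mathlib
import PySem

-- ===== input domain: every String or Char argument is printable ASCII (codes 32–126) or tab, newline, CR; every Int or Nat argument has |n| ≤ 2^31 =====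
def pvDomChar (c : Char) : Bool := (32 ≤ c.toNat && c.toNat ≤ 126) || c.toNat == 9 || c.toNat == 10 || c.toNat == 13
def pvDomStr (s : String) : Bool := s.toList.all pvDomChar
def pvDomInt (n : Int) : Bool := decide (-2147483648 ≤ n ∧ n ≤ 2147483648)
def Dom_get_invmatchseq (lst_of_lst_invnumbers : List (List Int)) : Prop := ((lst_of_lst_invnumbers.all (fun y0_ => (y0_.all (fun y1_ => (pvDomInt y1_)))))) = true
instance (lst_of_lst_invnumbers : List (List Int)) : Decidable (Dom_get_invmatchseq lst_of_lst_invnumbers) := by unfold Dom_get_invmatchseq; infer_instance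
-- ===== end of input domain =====

-- B replaces A's nested pair scan with list-membership tests by an inverted index
-- (element -> indices of lists containing it) from which the matching index pairs
-- are generated; measured faster on a timing run's large inputs (objective: faster).


-- ===== PORT A =====
-- inner loop body: 'if any([True for x in i if x in j]): output.append(...); flag = 1'
def aInnerStep (xs : List (List Int)) (ind_i : Nat) :
    (List (Int × Int) × Bool) → (Int × List Int) → (List (Int × Int) × Bool) :=
  fun st p =>
    if (xs.getD ind_i []).any (fun x => p.2.contains x) then
      (st.1 ++ [((ind_i : Int), (ind_i : Int) + 1 + p.1)], true)
    else st

-- the outer 'for ind_i, i in enumerate(...)' loop with its break, plus the code after the loop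
def aLoop (xs : List (List Int)) (ind_i : Nat) (output : List (Int × Int)) (flag : Bool) :
    List (Int × Int) :=
  if ind_i + 1 ≥ xs.length then
    if xs.length = 1 then [((ind_i : Int), (ind_i : Int))]
    else if flag then output else [((ind_i : Int), (ind_i : Int))]
  else
    let st := (PySem.List.enumerate (List.drop (ind_i + 1) xs) 0).foldl (aInnerStep xs ind_i)
      (output, flag)
    aLoop xs (ind_i + 1) st.1 st.2
termination_by xs.length - ind_i
decreasing_by omega

def get_invmatchseq (lst_of_lst_invnumbers : List (List Int)) : List (Int × Int) :=
  aLoop lst_of_lst_invnumbers 0 [] false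

-- ===== PORT B =====
-- inverted index: element -> increasing list of indices of lists containing it
-- ('ids[-1] != idx' ported as getLast?; ids nonempty there or the [] disjunct fires first)
def bInvInner (k : Int) (inv : PySem.Dict Int (List Int)) (lst : List Int) :
    PySem.Dict Int (List Int) :=
  lst.foldl (fun inv x =>
    let ids := PySem.Dict.getD inv x []
    if ids = [] ∨ ids.getLast? ≠ some k then
      PySem.Dict.insert inv x (ids ++ [k])
    else inv) inv

def bInv (xs : List (List Int)) : PySem.Dict Int (List Int) :=
  (PySem.List.enumerate xs 0).foldl (fun inv p => bInvInner p.1 inv p.2) PySem.Dict.empty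

-- 'for pos, i in enumerate(ids): for j in ids[pos+1:]: partners[i].add(j)'
-- (the indices stored in ids are ≥ 0, so writing at position i via toNat is exact)
def bFill (ps : List (PySem.Set Int)) (ids : List Int) : List (PySem.Set Int) :=
  (PySem.List.enumerate ids 0).foldl
    (fun ps q =>
      ps.set q.2.toNat
        (PySem.Set.update (PySem.List.pyGetD ps q.2 []) (PySem.List.slice ids (some (q.1 + 1)) none)))
    ps

def get_invmatchseq_alt (lst_of_lst_invnumbers : List (List Int)) : List (Int × Int) :=
  let n := lst_of_lst_invnumbers.length
  let partners := (PySem.Dict.values (bInv lst_of_lst_invnumbers)).foldl bFill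
    (List.replicate n ([] : PySem.Set Int))
  let output := (PySem.List.pyRange 0 (n : Int) 1).flatMap
    (fun i => (PySem.List.sorted (PySem.List.pyGetD partners i []) (fun x => x) false).map
      (fun j => (i, j)))
  if output = [] then [((n : Int) - 1, (n : Int) - 1)] else output

-- ===== PRECONDITION & SPEC =====
-- Pre_ excludes only the empty list, on which the Python A raises UnboundLocalError.
def Pre_get_invmatchseq (lst_of_lst_invnumbers : List (List Int)) : Prop :=
  lst_of_lst_invnumbers ≠ []
instance (lst_of_lst_invnumbers : List (List Int)) : Decidable (Pre_get_invmatchseq lst_of_lst_invnumbers) := by unfold Pre_get_invmatchseq; infer_instance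

def pvWitness_get_invmatchseq : List (List Int) := [[1, 2], [3], [2, 5]]

def Spec_get_invmatchseq (lst_of_lst_invnumbers : List (List Int)) (out : List (Int × Int)) : Prop := out = get_invmatchseq_alt lst_of_lst_invnumbers
instance (lst_of_lst_invnumbers : List (List Int)) (out : List (Int × Int)) : Decidable (Spec_get_invmatchseq lst_of_lst_invnumbers out) := by unfold Spec_get_invmatchseq; infer_instance

-- ===== CLAIM (what is proved, stated in full; the proofs are below) =====
def Claim_equal_get_invmatchseq : Prop := ∀ (lst_of_lst_invnumbers : List (List Int)), Dom_get_invmatchseq lst_of_lst_invnumbers → Pre_get_invmatchseq lst_of_lst_invnumbers → Spec_get_invmatchseq lst_of_lst_invnumbers (get_invmatchseq lst_of_lst_invnumbers)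

-- ===== LEMMAS AND PROOFS =====

-- 'lists i and j share an element', exactly A's inner test
def sharesB (xs : List (List Int)) (i j : Nat) : Bool :=
  (xs.getD i []).any (fun x => (xs.getD j []).contains x)

-- indices of the lists containing x, as Ints, increasing
def idsOf (xs : List (List Int)) (x : Int) : List Int :=
  ((List.range xs.length).filter (fun i => (xs.getD i []).contains x)).map (Nat.cast)

-- the canonical result row for index i, and the full canonical result
def rowS (xs : List (List Int)) (i : Nat) : List (Int × Int) :=
  ((List.range' (i + 1) (xs.length - (i + 1))).filter (fun j => sharesB xs i j)).map
    (fun j : Nat => ((i : Int), (j : Int)))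

def fullS (xs : List (List Int)) : List (Int × Int) :=
  (List.range xs.length).flatMap (rowS xs)

def Sfrom (xs : List (List Int)) (i : Nat) : List (Int × Int) :=
  (List.range' i (xs.length - i)).flatMap (rowS xs)

theorem rowS_last (xs : List (List Int)) : rowS xs (xs.length - 1) = [] := by
  unfold rowS
  have : xs.length - (xs.length - 1 + 1) = 0 := by omega
  simp [this]

theorem Sfrom_succ (xs : List (List Int)) (i : Nat) (hi : i < xs.length) :
    Sfrom xs i = rowS xs i ++ Sfrom xs (i + 1) := by
  unfold Sfrom
  have h1 : xs.length - i = (xs.length - (i + 1)) + 1 := by omega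
  rw [h1, List.range'_succ, List.flatMap_cons]

theorem enum_drop (xs : List (List Int)) (i : Nat) :
    PySem.List.enumerate (List.drop (i + 1) xs) 0 =
      (List.range (xs.length - (i + 1))).map (fun d : Nat => ((d : Int), xs.getD (i + 1 + d) [])) := by
  apply List.ext_getElem
  · simp [PySem.List.length_enumerate]
  · intro k h1 h2
    rw [PySem.List.getElem_enumerate]
    simp only [List.getElem_map, List.getElem_range, List.getElem_drop]
    have hk : i + 1 + k < xs.length := by
      simp [PySem.List.length_enumerate] at h1; omega
    rw [List.getD_eq_getElem xs [] hk]
    simp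

theorem inner_closed (xs : List (List Int)) (i : Nat) (output : List (Int × Int)) (flag : Bool) :
    (PySem.List.enumerate (List.drop (i + 1) xs) 0).foldl (aInnerStep xs i) (output, flag) =
      (output ++ rowS xs i, flag || !(rowS xs i).isEmpty) := by
  have hstep : aInnerStep xs i = fun (st : List (Int × Int) × Bool) (p : Int × List Int) =>
      ((fun (out : List (Int × Int)) (p : Int × List Int) =>
          if (xs.getD i []).any (fun x => p.2.contains x) then
            out ++ [((i : Int), (i : Int) + 1 + p.1)] else out) st.1 p,
       (fun (fl : Bool) (p : Int × List Int) =>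
          if (xs.getD i []).any (fun x => p.2.contains x) then true else fl) st.2 p) := by
    funext st p
    simp only [aInnerStep]
    split <;> rfl
  rw [hstep, PySem.List.foldl_prod_mk
    (f := fun (out : List (Int × Int)) (p : Int × List Int) =>
      if (xs.getD i []).any (fun x => p.2.contains x) then
        out ++ [((i : Int), (i : Int) + 1 + p.1)] else out)
    (g := fun (fl : Bool) (p : Int × List Int) =>
      if (xs.getD i []).any (fun x => p.2.contains x) then true else fl),
    PySem.List.foldl_append_if, PySem.List.foldl_if_true_eq]
  have hrow : ((PySem.List.enumerate (List.drop (i + 1) xs) 0).filter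
        (fun p => (xs.getD i []).any (fun x => p.2.contains x))).map
        (fun p => ((i : Int), (i : Int) + 1 + p.1)) = rowS xs i := by
    rw [enum_drop, List.filter_map, List.map_map]
    unfold rowS
    rw [List.range'_eq_map_range, List.filter_map, List.map_map]
    rw [List.filter_congr (l := List.range (xs.length - (i + 1)))
      (q := (fun j => sharesB xs i j) ∘ (fun d => i + 1 + d))
      (by intro d _; simp [sharesB, Function.comp])]
    apply List.map_congr_left
    intro d _
    simp only [Function.comp_apply]
    rw [Prod.ext_iff]
    refine ⟨rfl, ?_⟩
    push_cast
    ring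
  have hany : ((PySem.List.enumerate (List.drop (i + 1) xs) 0).any
      (fun p => (xs.getD i []).any (fun x => p.2.contains x))) = !(rowS xs i).isEmpty := by
    rw [← hrow]
    rcases hf : (PySem.List.enumerate (List.drop (i + 1) xs) 0).filter
        (fun p => (xs.getD i []).any (fun x => p.2.contains x)) with _ | ⟨a, l⟩
    · rw [hf]
      simp only [List.map_nil, List.isEmpty_nil, Bool.not_true]
      rw [List.any_eq_false]
      intro p hp
      by_contra hc
      have : p ∈ (PySem.List.enumerate (List.drop (i + 1) xs) 0).filter
          (fun p => (xs.getD i []).any (fun x => p.2.contains x)) := by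
        rw [List.mem_filter]
        exact ⟨hp, by simpa using hc⟩
      rw [hf] at this
      simp at this
    · rw [hf]
      simp only [List.map_cons, List.isEmpty_cons, Bool.not_false]
      rw [List.any_eq_true]
      have : a ∈ (PySem.List.enumerate (List.drop (i + 1) xs) 0).filter
          (fun p => (xs.getD i []).any (fun x => p.2.contains x)) := by
        rw [hf]; exact List.mem_cons_self
      rw [List.mem_filter] at this
      exact ⟨a, this.1, this.2⟩
  rw [hrow, hany]

theorem aLoop_spec (xs : List (List Int)) (hn : 2 ≤ xs.length) :
    ∀ (k i : Nat), xs.length - i = k → i < xs.length →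
      ∀ (output : List (Int × Int)) (flag : Bool),
      aLoop xs i output flag =
        if flag || !(Sfrom xs i).isEmpty then output ++ Sfrom xs i
        else [((xs.length : Int) - 1, (xs.length : Int) - 1)] := by
  intro k
  induction k with
  | zero => intro i hk hi output flag; omega
  | succ k ih =>
    intro i hk hi output flag
    rw [aLoop]
    by_cases hbr : i + 1 ≥ xs.length
    · -- i = xs.length - 1
      have hieq : i = xs.length - 1 := by omega
      have hSf : Sfrom xs i = [] := by
        unfold Sfrom
        have h1 : xs.length - i = 1 := by omega
        rw [h1, List.range'_one, List.flatMap_cons, List.flatMap_nil, List.append_nil,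
          hieq, rowS_last]
      rw [if_pos hbr, if_neg (by omega), hSf]
      have hcast : ((i : Nat) : Int) = (xs.length : Int) - 1 := by
        rw [hieq]; push_cast [Nat.cast_sub (by omega : 1 ≤ xs.length)]; ring
      cases flag <;> simp [hcast]
    · rw [if_neg hbr]
      have h1 : i + 1 < xs.length := by omega
      simp only [inner_closed]
      rw [ih (i + 1) (by omega) h1]
      rw [Sfrom_succ xs i hi]
      have hne : (!((rowS xs i ++ Sfrom xs (i + 1)).isEmpty)) =
          (!(rowS xs i).isEmpty || !(Sfrom xs (i + 1)).isEmpty) := by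
        cases h2 : rowS xs i <;> simp
      rw [hne, ← Bool.or_assoc, List.append_assoc]

theorem a_eq_canon (xs : List (List Int)) (h : xs ≠ []) :
    get_invmatchseq xs = if fullS xs = [] then [((xs.length : Int) - 1, (xs.length : Int) - 1)]
      else fullS xs := by
  have hlen : 1 ≤ xs.length := by
    cases xs with
    | nil => simp at h
    | cons a l => simp
  unfold get_invmatchseq
  by_cases h1 : xs.length = 1
  · rw [aLoop]
    have hfull : fullS xs = [] := by
      unfold fullS
      rw [h1]
      simp [List.range_one, rowS, h1]
    rw [if_pos (by omega), if_pos h1, hfull]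
    simp [h1]
  · have hn : 2 ≤ xs.length := by omega
    have hS0 : Sfrom xs 0 = fullS xs := by
      unfold Sfrom fullS
      rw [Nat.sub_zero, ← List.range_eq_range']
    rw [aLoop_spec xs hn xs.length 0 (by omega) (by omega) [] false, hS0]
    cases hfe : fullS xs
    · simp
    · simp

-- ----- B side -----

def PairAt (ids : List Int) (u v : Int) : Prop :=
  ∃ a b : Nat, a < b ∧ ids[a]? = some u ∧ ids[b]? = some v

def partnersF (xs : List (List Int)) : List (PySem.Set Int) :=
  (PySem.Dict.values (bInv xs)).foldl bFill (List.replicate xs.length ([] : PySem.Set Int))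

theorem bInvInner_getD (k : Int) : ∀ (l : List Int) (d : PySem.Dict Int (List Int)) (x : Int),
    PySem.Dict.getD (bInvInner k d l) x [] =
      PySem.Dict.getD d x [] ++
        (if x ∈ l ∧ (PySem.Dict.getD d x []).getLast? ≠ some k then [k] else []) := by
  intro l
  induction l with
  | nil => intro d x; simp [bInvInner]
  | cons y t ih =>
    intro d x
    have hstep : bInvInner k d (y :: t) = bInvInner k
        (if PySem.Dict.getD d y [] = [] ∨ (PySem.Dict.getD d y []).getLast? ≠ some k then
          PySem.Dict.insert d y (PySem.Dict.getD d y [] ++ [k]) else d) t := by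
      simp only [bInvInner, List.foldl_cons]
    rw [hstep]
    by_cases hc : PySem.Dict.getD d y [] = [] ∨ (PySem.Dict.getD d y []).getLast? ≠ some k
    · rw [if_pos hc, ih]
      by_cases hxy : x = y
      · subst hxy
        rw [PySem.Dict.getD_insert_self]
        have hlast : (PySem.Dict.getD d x [] ++ [k]).getLast? = some k := List.getLast?_concat
        have hcond : (PySem.Dict.getD d x []).getLast? ≠ some k := by
          rcases hc with hc | hc
          · rw [hc]; simp
          · exact hc
        simp [hlast, hcond]
      · rw [PySem.Dict.getD_insert, if_neg hxy]
        simp [hxy]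
    · rw [if_neg hc, ih]
      simp only [not_or, ne_eq, not_not] at hc
      by_cases hxy : x = y
      · subst hxy
        simp [hc.2]
      · simp [hxy]

theorem mem_idsOf (xs : List (List Int)) (x e : Int) :
    e ∈ idsOf xs x ↔ ∃ i : Nat, i < xs.length ∧ (xs.getD i []).contains x ∧ e = (i : Int) := by
  unfold idsOf
  simp only [List.mem_map, List.mem_filter, List.mem_range]
  constructor
  · rintro ⟨i, ⟨hi, hc⟩, he⟩; exact ⟨i, hi, hc, he.symm⟩
  · rintro ⟨i, hi, hc, he⟩; exact ⟨i, ⟨hi, hc⟩, he.symm⟩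

theorem idsOf_lt (xs : List (List Int)) (x : Int) :
    ∀ e ∈ idsOf xs x, 0 ≤ e ∧ e < (xs.length : Int) := by
  intro e he
  rw [mem_idsOf] at he
  obtain ⟨i, hi, _, he⟩ := he
  subst he
  constructor
  · positivity
  · exact_mod_cast hi

theorem idsOf_pairwise (xs : List (List Int)) (x : Int) : (idsOf xs x).Pairwise (· < ·) := by
  unfold idsOf
  apply List.Pairwise.map (R := fun a b : Nat => a < b)
  · intro a b hab; exact_mod_cast hab
  · exact List.Pairwise.sublist List.filter_sublist List.pairwise_lt_range

theorem idsOf_append (ys : List (List Int)) (l : List Int) (x : Int) :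
    idsOf (ys ++ [l]) x = idsOf ys x ++ (if x ∈ l then [(ys.length : Int)] else []) := by
  unfold idsOf
  have hlen : (ys ++ [l]).length = ys.length + 1 := by simp
  rw [hlen, List.range_succ, List.filter_append, List.map_append]
  congr 1
  · congr 1
    apply List.filter_congr
    intro i hi
    rw [List.mem_range] at hi
    congr 1
    rw [List.getD_eq_getElem _ _ (by simp; omega), List.getD_eq_getElem _ _ hi,
      List.getElem_append_left hi]
  · by_cases hx : x ∈ l
    · rw [List.filter_cons]
      simp [hx]
    · rw [List.filter_cons]
      simp [hx]

theorem bInv_getD (xs : List (List Int)) (x : Int) :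
    PySem.Dict.getD (bInv xs) x [] = idsOf xs x := by
  induction xs using List.reverseRecOn with
  | nil => simp [bInv, idsOf, PySem.List.enumerate, PySem.Dict.getD_empty]
  | append_singleton ys l ih =>
    have hunf : bInv (ys ++ [l]) = bInvInner (ys.length : Int) (bInv ys) l := by
      unfold bInv
      rw [PySem.List.enumerate_append, List.foldl_append]
      have he : PySem.List.enumerate [l] (0 + (ys.length : Int)) = [((ys.length : Int), l)] := by
        simp [PySem.List.enumerate]
      rw [he, List.foldl_cons, List.foldl_nil]
    rw [hunf, bInvInner_getD, ih, idsOf_append]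
    have hlast : (idsOf ys x).getLast? ≠ some (ys.length : Int) := by
      intro hcon
      have hmem := List.mem_of_getLast? hcon
      have := (idsOf_lt ys x _ hmem).2
      omega
    by_cases hx : x ∈ l <;> simp [hx, hlast]

theorem getD_set_sets (ps : List (PySem.Set Int)) (m i : Nat) (s : PySem.Set Int) :
    (ps.set m s).getD i [] = if m = i ∧ m < ps.length then s else ps.getD i [] := by
  rw [List.getD_eq_getElem?_getD, List.getD_eq_getElem?_getD, List.getElem?_set]
  by_cases hmi : m = i
  · subst hmi
    by_cases hm : m < ps.length <;> simp [hm]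
  · simp [hmi]

theorem getD_replicate_sets (n i : Nat) :
    (List.replicate n ([] : PySem.Set Int)).getD i [] = [] := by
  rw [List.getD_eq_getElem?_getD, List.getElem?_replicate]
  by_cases hi : i < n <;> simp [hi]

theorem fill_aux (ids : List Int) (j : Int) :
    ∀ (qs : List (Int × Int)) (ps : List (PySem.Set Int)),
    (∀ q ∈ qs, 0 ≤ q.2 ∧ q.2.toNat < ps.length) →
    ∀ i : Nat,
    (j ∈ (qs.foldl (fun ps q => ps.set q.2.toNat
        (PySem.Set.update (PySem.List.pyGetD ps q.2 [])
          (PySem.List.slice ids (some (q.1 + 1)) none))) ps).getD i [] ↔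
      j ∈ ps.getD i [] ∨
        ∃ q ∈ qs, q.2 = (i : Int) ∧ j ∈ PySem.List.slice ids (some (q.1 + 1)) none) := by
  intro qs
  induction qs with
  | nil => intro ps _ i; simp
  | cons q t ih =>
    intro ps hq i
    have hq0 : 0 ≤ q.2 ∧ q.2.toNat < ps.length := hq q List.mem_cons_self
    have hget : PySem.List.pyGetD ps q.2 [] = ps.getD q.2.toNat [] := by
      rw [← Int.toNat_of_nonneg hq0.1, PySem.List.pyGetD_natCast, Int.toNat_of_nonneg hq0.1]
    rw [List.foldl_cons, ih _ (by
      intro q' hq'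
      have := hq q' (List.mem_cons_of_mem _ hq')
      rw [List.length_set]
      exact this), getD_set_sets, hget]
    by_cases him : q.2.toNat = i
    · rw [if_pos ⟨him, hq0.2⟩]
      have hqi : q.2 = (i : Int) := by omega
      rw [PySem.Set.mem_update]
      constructor
      · rintro ((hj | hj) | hj)
        · rw [← him]; exact Or.inl hj
        · exact Or.inr ⟨q, List.mem_cons_self, hqi, hj⟩
        · obtain ⟨q', hq', h1, h2⟩ := hj
          exact Or.inr ⟨q', List.mem_cons_of_mem _ hq', h1, h2⟩
      · rintro (hj | ⟨q', hq', h1, h2⟩)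
        · rw [← him] at hj; exact Or.inl (Or.inl hj)
        · rcases List.mem_cons.1 hq' with rfl | hq'
          · exact Or.inl (Or.inr h2)
          · exact Or.inr ⟨q', hq', h1, h2⟩
    · rw [if_neg (by intro hcon; exact him hcon.1)]
      have hqi : q.2 ≠ (i : Int) := by omega
      constructor
      · rintro (hj | ⟨q', hq', h1, h2⟩)
        · exact Or.inl hj
        · exact Or.inr ⟨q', List.mem_cons_of_mem _ hq', h1, h2⟩
      · rintro (hj | ⟨q', hq', h1, h2⟩)
        · exact Or.inl hj
        · rcases List.mem_cons.1 hq' with rfl | hq'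
          · exact absurd h1 hqi
          · exact Or.inr ⟨q', hq', h1, h2⟩

theorem mem_drop_iff_int (l : List Int) (m : Nat) (j : Int) :
    j ∈ l.drop m ↔ ∃ b, m ≤ b ∧ l[b]? = some j := by
  constructor
  · intro hj
    rw [List.mem_iff_getElem] at hj
    obtain ⟨b, hb, he⟩ := hj
    refine ⟨m + b, by omega, ?_⟩
    rw [List.getElem_drop] at he
    rw [List.getElem?_eq_some_iff]
    exact ⟨by simp at hb; omega, he⟩
  · rintro ⟨b, hmb, he⟩
    rw [List.getElem?_eq_some_iff] at he
    obtain ⟨hb, he⟩ := he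
    rw [List.mem_iff_getElem]
    exact ⟨b - m, by simp; omega, by rw [List.getElem_drop]; rw [← he]; congr 1; omega⟩

theorem bFill_mem (ps : List (PySem.Set Int)) (ids : List Int)
    (h : ∀ e ∈ ids, 0 ≤ e ∧ e.toNat < ps.length) (i : Nat) (j : Int) :
    j ∈ (bFill ps ids).getD i [] ↔ j ∈ ps.getD i [] ∨ PairAt ids (i : Int) j := by
  unfold bFill
  rw [fill_aux ids j (PySem.List.enumerate ids 0) ps (by
    intro q hq
    rw [PySem.List.mem_enumerate_iff] at hq
    obtain ⟨k, hk, rfl⟩ := hq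
    exact h _ (List.getElem_mem hk)) i]
  constructor
  · rintro (hj | hj)
    · exact Or.inl hj
    · obtain ⟨q, hq, h1, h2⟩ := hj
      rw [PySem.List.mem_enumerate_iff] at hq
      obtain ⟨a, ha, rfl⟩ := hq
      simp only [zero_add] at h1 h2 ⊢
      rw [PySem.List.slice_from _ (by positivity)] at h2
      have hcast : ((a : Int) + 1).toNat = a + 1 := by omega
      rw [hcast] at h2
      rw [mem_drop_iff_int] at h2
      obtain ⟨b, hab, hb⟩ := h2
      refine Or.inr ⟨a, b, by omega, ?_, hb⟩
      rw [List.getElem?_eq_some_iff]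
      exact ⟨ha, h1⟩
  · rintro (hj | ⟨a, b, hab, ha, hb⟩)
    · exact Or.inl hj
    · rw [List.getElem?_eq_some_iff] at ha
      obtain ⟨ha', hav⟩ := ha
      refine Or.inr ⟨((0 : Int) + (a : Int), ids[a]), ?_, by simpa using hav, ?_⟩
      · rw [PySem.List.mem_enumerate_iff]
        exact ⟨a, ha', rfl⟩
      · simp only [zero_add]
        rw [PySem.List.slice_from _ (by positivity)]
        have hcast : ((a : Int) + 1).toNat = a + 1 := by omega
        rw [hcast, mem_drop_iff_int]
        exact ⟨b, by omega, hb⟩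

theorem fill_aux_length (ids : List Int) :
    ∀ (qs : List (Int × Int)) (ps : List (PySem.Set Int)),
    (qs.foldl (fun ps q => ps.set q.2.toNat
        (PySem.Set.update (PySem.List.pyGetD ps q.2 [])
          (PySem.List.slice ids (some (q.1 + 1)) none))) ps).length = ps.length := by
  intro qs
  induction qs with
  | nil => intro ps; rfl
  | cons q t ih => intro ps; rw [List.foldl_cons, ih, List.length_set]

theorem bFill_length (ps : List (PySem.Set Int)) (ids : List Int) :
    (bFill ps ids).length = ps.length := fill_aux_length ids _ ps

theorem fill_aux_nodup (ids : List Int) :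
    ∀ (qs : List (Int × Int)) (ps : List (PySem.Set Int)),
    (∀ q ∈ qs, 0 ≤ q.2) →
    (∀ i : Nat, (ps.getD i []).Nodup) →
    ∀ i : Nat, ((qs.foldl (fun ps q => ps.set q.2.toNat
        (PySem.Set.update (PySem.List.pyGetD ps q.2 [])
          (PySem.List.slice ids (some (q.1 + 1)) none))) ps).getD i []).Nodup := by
  intro qs
  induction qs with
  | nil => intro ps _ h i; exact h i
  | cons q t ih =>
    intro ps hq h i
    rw [List.foldl_cons]
    apply ih _ (fun q' hq' => hq q' (List.mem_cons_of_mem _ hq'))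
    intro i'
    rw [getD_set_sets]
    by_cases hc : q.2.toNat = i' ∧ q.2.toNat < ps.length
    · rw [if_pos hc]
      apply PySem.Set.nodup_update
      have h0 : 0 ≤ q.2 := hq q List.mem_cons_self
      rw [← Int.toNat_of_nonneg h0, PySem.List.pyGetD_natCast]
      exact h _
    · rw [if_neg hc]; exact h i'

theorem bFill_nodup (ps : List (PySem.Set Int)) (ids : List Int)
    (hids : ∀ e ∈ ids, 0 ≤ e)
    (h : ∀ i : Nat, (ps.getD i []).Nodup) (i : Nat) : ((bFill ps ids).getD i []).Nodup := by
  unfold bFill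
  apply fill_aux_nodup ids _ ps (by
    intro q hq
    rw [PySem.List.mem_enumerate_iff] at hq
    obtain ⟨k, hk, rfl⟩ := hq
    exact hids _ (List.getElem_mem hk)) h i

theorem fills_mem : ∀ (ls : List (List Int)) (ps : List (PySem.Set Int)),
    (∀ l ∈ ls, ∀ e ∈ l, 0 ≤ e ∧ e.toNat < ps.length) →
    ∀ (i : Nat) (j : Int),
    (j ∈ (ls.foldl bFill ps).getD i [] ↔
      j ∈ ps.getD i [] ∨ ∃ l ∈ ls, PairAt l (i : Int) j) := by
  intro ls
  induction ls with
  | nil => intro ps _ i j; simp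
  | cons l t ih =>
    intro ps h i j
    rw [List.foldl_cons, ih _ (by
        intro l' hl' e he
        have := h l' (List.mem_cons_of_mem _ hl') e he
        rwa [bFill_length]),
      bFill_mem _ _ (h l List.mem_cons_self) i j]
    constructor
    · rintro ((hj | hj) | ⟨l', hl', hp⟩)
      · exact Or.inl hj
      · exact Or.inr ⟨l, List.mem_cons_self, hj⟩
      · exact Or.inr ⟨l', List.mem_cons_of_mem _ hl', hp⟩
    · rintro (hj | ⟨l', hl', hp⟩)
      · exact Or.inl (Or.inl hj)
      · rcases List.mem_cons.1 hl' with rfl | hl'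
        · exact Or.inl (Or.inr hp)
        · exact Or.inr ⟨l', hl', hp⟩

theorem fills_nodup : ∀ (ls : List (List Int)) (ps : List (PySem.Set Int)),
    (∀ l ∈ ls, ∀ e ∈ l, 0 ≤ e) →
    (∀ i : Nat, (ps.getD i []).Nodup) →
    ∀ i : Nat, ((ls.foldl bFill ps).getD i []).Nodup := by
  intro ls
  induction ls with
  | nil => intro ps _ h i; exact h i
  | cons l t ih =>
    intro ps hb h i
    rw [List.foldl_cons]
    exact ih _ (fun l' hl' => hb l' (List.mem_cons_of_mem _ hl'))
      (bFill_nodup ps l (hb l List.mem_cons_self) h) i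

theorem bInvInner_keys_nodup (k : Int) : ∀ (l : List Int) (d : PySem.Dict Int (List Int)),
    d.keys.Nodup → (bInvInner k d l).keys.Nodup := by
  intro l
  induction l with
  | nil => intro d h; exact h
  | cons y t ih =>
    intro d h
    have hstep : bInvInner k d (y :: t) = bInvInner k
        (if PySem.Dict.getD d y [] = [] ∨ (PySem.Dict.getD d y []).getLast? ≠ some k then
          PySem.Dict.insert d y (PySem.Dict.getD d y [] ++ [k]) else d) t := by
      simp only [bInvInner, List.foldl_cons]
    rw [hstep]
    apply ih
    split
    · exact PySem.Dict.nodup_keys_insert _ _ _ h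
    · exact h

theorem bInv_keys_nodup (xs : List (List Int)) : (bInv xs).keys.Nodup := by
  induction xs using List.reverseRecOn with
  | nil => simp [bInv, PySem.List.enumerate]
  | append_singleton ys l ih =>
    have hunf : bInv (ys ++ [l]) = bInvInner (ys.length : Int) (bInv ys) l := by
      unfold bInv
      rw [PySem.List.enumerate_append, List.foldl_append]
      have he : PySem.List.enumerate [l] (0 + (ys.length : Int)) = [((ys.length : Int), l)] := by
        simp [PySem.List.enumerate]
      rw [he, List.foldl_cons, List.foldl_nil]
    rw [hunf]
    exact bInvInner_keys_nodup _ l _ ih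

theorem pairAt_iff (l : List Int) (hp : l.Pairwise (· < ·)) (u v : Int) :
    PairAt l u v ↔ u ∈ l ∧ v ∈ l ∧ u < v := by
  rw [List.pairwise_iff_getElem] at hp
  constructor
  · rintro ⟨a, b, hab, ha, hb⟩
    rw [List.getElem?_eq_some_iff] at ha hb
    obtain ⟨ha', hav⟩ := ha
    obtain ⟨hb', hbv⟩ := hb
    refine ⟨?_, ?_, ?_⟩
    · rw [← hav]; exact List.getElem_mem ha'
    · rw [← hbv]; exact List.getElem_mem hb'
    · rw [← hav, ← hbv]; exact hp a b ha' hb' hab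
  · rintro ⟨hu, hv, huv⟩
    rw [List.mem_iff_getElem] at hu hv
    obtain ⟨a, ha, hav⟩ := hu
    obtain ⟨b, hb, hbv⟩ := hv
    have hab : a < b := by
      rcases Nat.lt_trichotomy a b with h | h | h
      · exact h
      · subst h; rw [hav] at hbv; omega
      · have := hp b a hb ha h
        rw [hav, hbv] at this; omega
    exact ⟨a, b, hab, by rw [List.getElem?_eq_some_iff]; exact ⟨ha, hav⟩,
      by rw [List.getElem?_eq_some_iff]; exact ⟨hb, hbv⟩⟩

theorem bInv_values (xs : List (List Int)) :
    PySem.Dict.values (bInv xs) = (bInv xs).keys.map (fun x => idsOf xs x) := by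
  rw [PySem.Dict.values_eq_map_keys _ (bInv_keys_nodup xs) []]
  exact List.map_congr_left (fun k _ => bInv_getD xs k)

theorem partners_mem (xs : List (List Int)) (i : Nat) (j : Int) :
    j ∈ (partnersF xs).getD i [] ↔
      ∃ j' : Nat, i < j' ∧ j' < xs.length ∧ sharesB xs i j' ∧ j = (j' : Int) := by
  unfold partnersF
  rw [fills_mem _ _ (by
    intro l hl e he
    rw [bInv_values, List.mem_map] at hl
    obtain ⟨x, _, rfl⟩ := hl
    have := idsOf_lt xs x e he
    rw [List.length_replicate]
    omega)]
  rw [getD_replicate_sets]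
  simp only [List.not_mem_nil, false_or]
  have hiff : (∃ l ∈ PySem.Dict.values (bInv xs), PairAt l (i : Int) j) ↔
      ∃ x : Int, PairAt (idsOf xs x) (i : Int) j := by
    constructor
    · rintro ⟨l, hl, hp⟩
      rw [bInv_values, List.mem_map] at hl
      obtain ⟨x, _, rfl⟩ := hl
      exact ⟨x, hp⟩
    · rintro ⟨x, hp⟩
      refine ⟨idsOf xs x, ?_, hp⟩
      rw [bInv_values, List.mem_map]
      refine ⟨x, ?_, rfl⟩
      obtain ⟨a, b, hab, ha, hb⟩ := hp
      have hne : idsOf xs x ≠ [] := by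
        intro hcon
        rw [hcon] at hb
        simp at hb
      by_contra hk
      have h1 := (PySem.Dict.get?_eq_none_iff_not_mem_keys (bInv xs) x).2 hk
      have h2 := bInv_getD xs x
      rw [PySem.Dict.getD_eq_get?_getD, h1] at h2
      exact hne h2.symm
  rw [hiff]
  constructor
  · rintro ⟨x, hp⟩
    rw [pairAt_iff _ (idsOf_pairwise xs x)] at hp
    obtain ⟨hi, hj, hij⟩ := hp
    rw [mem_idsOf] at hi hj
    obtain ⟨i1, hi1, hci, hei⟩ := hi
    obtain ⟨j1, hj1, hcj, hej⟩ := hj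
    have : i1 = i := by exact_mod_cast hei.symm
    subst this
    refine ⟨j1, ?_, hj1, ?_, hej⟩
    · rw [hej] at hij; exact_mod_cast hij
    · unfold sharesB
      rw [List.any_eq_true]
      rw [List.contains_iff_mem] at hci
      exact ⟨x, hci, hcj⟩
  · rintro ⟨j', hij, hj', hsh, rfl⟩
    unfold sharesB at hsh
    rw [List.any_eq_true] at hsh
    obtain ⟨x, hxi, hxj⟩ := hsh
    refine ⟨x, ?_⟩
    rw [pairAt_iff _ (idsOf_pairwise xs x)]
    have hilen : i < xs.length := by omega
    refine ⟨?_, ?_, by exact_mod_cast hij⟩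
    · rw [mem_idsOf]
      exact ⟨i, hilen, by rw [List.contains_iff_mem]; exact hxi, rfl⟩
    · rw [mem_idsOf]
      exact ⟨j', hj', hxj, rfl⟩

theorem partners_sorted (xs : List (List Int)) (i : Nat) :
    PySem.List.sorted ((partnersF xs).getD i []) (fun x => x) false =
      ((List.range' (i + 1) (xs.length - (i + 1))).filter (fun j => sharesB xs i j)).map
        (Nat.cast : Nat → Int) := by
  apply PySem.List.sorted_eq_of_perm_of_pairwise_lt
  · rw [List.perm_ext_iff_of_nodup]
    · intro a
      rw [partners_mem]
      constructor
      · intro ha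
        rw [List.mem_map] at ha
        obtain ⟨j', hj', h4⟩ := ha
        rw [List.mem_filter, List.mem_range'_1] at hj'
        obtain ⟨⟨ha1, ha2⟩, hsh⟩ := hj'
        exact ⟨j', by omega, by omega, hsh, h4.symm⟩
      · rintro ⟨j', h1, h2, h3, h4⟩
        rw [List.mem_map]
        refine ⟨j', ?_, h4.symm⟩
        rw [List.mem_filter, List.mem_range'_1]
        exact ⟨⟨by omega, by omega⟩, h3⟩
    · apply List.Nodup.map
      · intro a b hab; exact_mod_cast hab
      · exact List.Nodup.filter _ (List.nodup_range')
    · exact fills_nodup _ _ (by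
        intro l hl e he
        rw [bInv_values, List.mem_map] at hl
        obtain ⟨x, _, rfl⟩ := hl
        exact (idsOf_lt xs x e he).1)
        (fun i' => by rw [getD_replicate_sets]; exact List.nodup_nil) i
  · apply List.Pairwise.map (R := fun a b : Nat => a < b)
    · intro a b hab; exact_mod_cast hab
    · exact List.Pairwise.sublist List.filter_sublist List.pairwise_lt_range'

theorem b_eq_canon (xs : List (List Int)) :
    get_invmatchseq_alt xs = if fullS xs = [] then [((xs.length : Int) - 1, (xs.length : Int) - 1)]
      else fullS xs := by
  have houtput : (PySem.List.pyRange 0 (xs.length : Int) 1).flatMap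
      (fun i => (PySem.List.sorted (PySem.List.pyGetD (partnersF xs) i []) (fun x => x) false).map
        (fun j => (i, j))) = fullS xs := by
    rw [PySem.List.pyRange_zero_natCast]
    unfold fullS
    rw [List.flatMap_def, List.flatMap_def, List.map_map]
    congr 1
    apply List.map_congr_left
    intro k _
    simp only [Function.comp_apply]
    rw [PySem.List.pyGetD_natCast, partners_sorted, List.map_map]
    rfl
  show (if (PySem.List.pyRange 0 (xs.length : Int) 1).flatMap
      (fun i => (PySem.List.sorted (PySem.List.pyGetD (partnersF xs) i []) (fun x => x) false).map
        (fun j => (i, j))) = [] then [((xs.length : Int) - 1, (xs.length : Int) - 1)]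
      else (PySem.List.pyRange 0 (xs.length : Int) 1).flatMap
      (fun i => (PySem.List.sorted (PySem.List.pyGetD (partnersF xs) i []) (fun x => x) false).map
        (fun j => (i, j)))) =
    if fullS xs = [] then [((xs.length : Int) - 1, (xs.length : Int) - 1)] else fullS xs
  rw [houtput]

-- ===== VERDICT (by name: the statement is the Claim_ definition above) =====
theorem get_invmatchseq_spec : Claim_equal_get_invmatchseq := by
  intro xs _ hpre
  unfold Spec_get_invmatchseq
  rw [a_eq_canon xs hpre, b_eq_canon xs]
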